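-- pv_equiv track=rewrite | github.com/veg/idepi | lib/idepi/_util.py | alph_to_base_26
-- ===== SOURCE A (Python) =====
-- def alph_to_base_26(str):
--     cols = {}
--     col_idx = 0
--     for i in range(len(str)-1, -1, -1):
--         new_val = ord(str[i]) - ord('a') + 1
--         cols[col_idx] = new_val
--         col_idx += 1
--     for i in range(col_idx):
--         if cols[i] > 25:
--             cols[i] %= 26
--             if (i+1) not in cols:
--                 cols[i+1] = 0
--             cols[i+1] += 1
--     return cols
-- ===== SOURCE B (Python) =====
-- def alph_to_base_26(str):
--     cols = {}
--     idx = 0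
--     carry = 0
--     for c in reversed(str):
--         val = ord(c) - ord('a') + 1 + carry
--         carry = 0
--         if val > 25:
--             val %= 26
--             carry = 1
--         cols[idx] = val
--         idx += 1
--     if carry:
--         cols[idx] = 1
--     return cols
-- ===== Notes on version B (the rewrite author's own statement) =====
-- stated objective: simpler
-- what changed: Replaces the build-then-correct two-pass dict construction with a single backward pass that threads a running carry accumulator, emitting each final digit immediately and appending the overflow column at the end.
import Mathlib
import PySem

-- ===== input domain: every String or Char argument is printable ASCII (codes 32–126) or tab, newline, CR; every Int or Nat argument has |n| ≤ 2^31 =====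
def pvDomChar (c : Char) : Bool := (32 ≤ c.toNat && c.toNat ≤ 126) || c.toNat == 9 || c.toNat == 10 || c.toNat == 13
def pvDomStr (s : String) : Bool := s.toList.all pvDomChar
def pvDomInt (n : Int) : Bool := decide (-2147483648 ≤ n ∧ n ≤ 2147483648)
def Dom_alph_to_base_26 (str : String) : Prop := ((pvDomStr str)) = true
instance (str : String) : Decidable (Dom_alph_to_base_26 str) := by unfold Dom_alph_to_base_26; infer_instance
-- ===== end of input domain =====

-- B replaces A's build-then-correct two-pass dict construction by a single backward
-- pass threading a carry accumulator (objective: simpler; same O(n) cost).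


-- ord(c) - ord('a') + 1 (the same expression occurs in both Pythons)
def ordVal (c : Char) : Int := (c.toNat : Int) - 97 + 1

-- ===== PORT A =====
-- body of A's first loop: cols[col_idx] = ord(str[i]) - ord('a') + 1; col_idx += 1
-- (str[i] via pyGetD: i always in range here, so exact)
def aStep1 (cs : List Char) (st : PySem.Dict Int Int × Int) (i : Int) : PySem.Dict Int Int × Int :=
  (st.1.insert st.2 (ordVal (PySem.List.pyGetD cs i ' ')), st.2 + 1)

-- body of A's second loop; cols[i] and cols[i+1] are read with getD (the keys are
-- always present at those reads, so exact), cols[i+1] += 1 is insert of the read value + 1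
def aStep2 (cols : PySem.Dict Int Int) (i : Int) : PySem.Dict Int Int :=
  if cols.getD i 0 > 25 then
    let cols := cols.insert i (PySem.Int.mod (cols.getD i 0) 26)
    let cols := if cols.contains (i + 1) then cols else cols.insert (i + 1) 0
    cols.insert (i + 1) (cols.getD (i + 1) 0 + 1)
  else cols

def alph_to_base_26 (str : String) : List (Int × Int) :=
  let cs := str.toList
  let p := (PySem.List.pyRange ((cs.length : Int) - 1) (-1) (-1)).foldl (aStep1 cs)
    (PySem.Dict.empty, 0)
  ((PySem.List.pyRange 0 p.2 1).foldl aStep2 p.1).items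

-- ===== PORT B =====
-- B's loop over reversed(str) with the carry accumulator; the base case is
-- Source B's trailing 'if carry: cols[idx] = 1'
def altGo : List Char → Int → Int → List (Int × Int)
  | [], idx, carry => if carry = 1 then [(idx, 1)] else []
  | c :: rest, idx, carry =>
    let val := (c.toNat : Int) - 97 + 1 + carry
    if val > 25 then (idx, PySem.Int.mod val 26) :: altGo rest (idx + 1) 1
    else (idx, val) :: altGo rest (idx + 1) 0

def alph_to_base_26_alt (str : String) : List (Int × Int) :=
  altGo str.toList.reverse 0 0

-- ===== PRECONDITION & SPEC =====
def Spec_alph_to_base_26 (str : String) (out : List (Int × Int)) : Prop := out = alph_to_base_26_alt str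
instance (str : String) (out : List (Int × Int)) : Decidable (Spec_alph_to_base_26 str out) := by unfold Spec_alph_to_base_26; infer_instance

-- ===== CLAIM (what is proved, stated in full; the proofs are below) =====
def Claim_equal_alph_to_base_26 : Prop := ∀ (str : String), Dom_alph_to_base_26 str → Spec_alph_to_base_26 str (alph_to_base_26 str)

-- ===== LEMMAS AND PROOFS =====

-- valGo: altGo on the list of already-computed letter values
def valGo : List Int → Int → Int → List (Int × Int)
  | [], idx, carry => if carry = 1 then [(idx, 1)] else []
  | v :: rest, idx, carry =>
    let w := v + carry
    if w > 25 then (idx, PySem.Int.mod w 26) :: valGo rest (idx + 1) 1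
    else (idx, w) :: valGo rest (idx + 1) 0

theorem altGo_eq_valGo (l : List Char) (idx carry : Int) :
    altGo l idx carry = valGo (l.map ordVal) idx carry := by
  induction l generalizing idx carry with
  | nil => rfl
  | cons c rest ih => simp [altGo, valGo, ordVal, ih]

theorem valGo_carry (v : Int) (t : List Int) (idx : Int) :
    valGo (v :: t) idx 1 = valGo ((v + 1) :: t) idx 0 := by
  simp [valGo]

-- the pairs (idx, v0), (idx+1, v1), … of the first pass
def enumFrom (idx : Int) : List Int → List (Int × Int)
  | [] => []
  | v :: rest => (idx, v) :: enumFrom (idx + 1) rest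

theorem enumFrom_keys_ge (l : List Int) (j : Int) :
    ∀ p ∈ enumFrom j l, j ≤ p.1 := by
  induction l generalizing j with
  | nil => simp [enumFrom]
  | cons v rest ih =>
    intro p hp
    simp only [enumFrom, List.mem_cons] at hp
    rcases hp with h | h
    · subst h; simp
    · have := ih (j + 1) p h; omega


def step1 (st : PySem.Dict Int Int × Int) (v : Int) : PySem.Dict Int Int × Int :=
  (st.1.insert st.2 v, st.2 + 1)

theorem find?_skip (l r : List (Int × Int)) (k : Int) (h : ∀ p ∈ l, p.1 ≠ k) :
    List.find? (fun p => p.1 == k) (l ++ r) = List.find? (fun p => p.1 == k) r := by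
  induction l with
  | nil => rfl
  | cons q t ih =>
    have hq : (q.1 == k) = false := by
      simpa using h q (by simp)
    simp only [List.cons_append, List.find?_cons, hq]
    exact ih (fun p hp => h p (by simp [hp]))

theorem map_replace_skip (l : List (Int × Int)) (k : Int) (x : Int × Int)
    (h : ∀ p ∈ l, p.1 ≠ k) :
    l.map (fun p => if p.1 == k then x else p) = l := by
  induction l with
  | nil => rfl
  | cons q t ih =>
    have hq : q.1 ≠ k := h q (by simp)
    rw [List.map_cons, ih (fun p hp => h p (by simp [hp]))]
    simp [hq]

theorem getD_mid (pre rest : List (Int × Int)) (k v : Int)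
    (h : ∀ p ∈ pre, p.1 ≠ k) :
    (PySem.Dict.mk (pre ++ (k, v) :: rest)).getD k 0 = v := by
  unfold PySem.Dict.getD PySem.Dict.get?
  rw [show (PySem.Dict.mk (pre ++ (k, v) :: rest)).items = pre ++ (k, v) :: rest from rfl,
    find?_skip pre ((k, v) :: rest) k h]
  simp

theorem contains_mid (pre rest : List (Int × Int)) (k v : Int) :
    (PySem.Dict.mk (pre ++ (k, v) :: rest)).contains k = true := by
  simp [PySem.Dict.contains]

theorem contains_none (l : List (Int × Int)) (k : Int) (h : ∀ p ∈ l, p.1 ≠ k) :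
    (PySem.Dict.mk l).contains k = false := by
  simp only [PySem.Dict.contains, List.any_eq_false]
  intro p hp; simpa using h p hp

theorem insert_absent (l : List (Int × Int)) (k w : Int)
    (h : (PySem.Dict.mk l).contains k = false) :
    (PySem.Dict.mk l).insert k w = PySem.Dict.mk (l ++ [(k, w)]) := by
  unfold PySem.Dict.insert
  rw [h]
  simp

theorem insert_mid (pre rest : List (Int × Int)) (k v w : Int)
    (hpre : ∀ p ∈ pre, p.1 ≠ k) (hrest : ∀ p ∈ rest, p.1 ≠ k) :
    (PySem.Dict.mk (pre ++ (k, v) :: rest)).insert k w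
      = PySem.Dict.mk (pre ++ (k, w) :: rest) := by
  unfold PySem.Dict.insert
  rw [contains_mid pre rest k v]
  simp only [if_true]
  congr 1
  rw [List.map_append, List.map_cons, map_replace_skip pre k _ hpre,
    map_replace_skip rest k _ hrest]
  simp

-- first pass: inserting at fresh increasing keys appends the enumeration
theorem pass1 (l : List Int) (d : PySem.Dict Int Int) (idx : Int)
    (h : ∀ k, idx ≤ k → d.contains k = false) :
    l.foldl step1 (d, idx)
      = (PySem.Dict.mk (d.items ++ enumFrom idx l), idx + (l.length : Int)) := by
  induction l generalizing d idx with
  | nil => cases d; simp [enumFrom]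
  | cons v l ih =>
    have hc : d.contains idx = false := h idx le_rfl
    have hins : d.insert idx v = PySem.Dict.mk (d.items ++ [(idx, v)]) := by
      simp [PySem.Dict.insert, hc]
    have h' : ∀ k, idx + 1 ≤ k →
        (PySem.Dict.mk (d.items ++ [(idx, v)])).contains k = false := by
      intro k hk
      have h1 : d.contains k = false := h k (by omega)
      simp only [PySem.Dict.contains] at h1 ⊢
      simp only [List.any_append, h1, Bool.false_or, List.any_cons, List.any_nil,
        Bool.or_false]
      simp; omega
    calc (v :: l).foldl step1 (d, idx)
        = l.foldl step1 (PySem.Dict.mk (d.items ++ [(idx, v)]), idx + 1) := by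
          simp [step1, hins]
      _ = (PySem.Dict.mk (d.items ++ enumFrom idx (v :: l)),
            idx + ((v :: l).length : Int)) := by
          rw [ih _ _ h']
          simp [enumFrom]
          omega

-- second pass: rippling the carries over the enumeration is B's single pass
theorem pass2 (n : Nat) : ∀ (vs : List Int), vs.length = n →
    ∀ (i : Int) (done : List (Int × Int)), (∀ p ∈ done, p.1 < i) →
    (PySem.List.pyRange i (i + (vs.length : Int)) 1).foldl aStep2
        (PySem.Dict.mk (done ++ enumFrom i vs))
      = PySem.Dict.mk (done ++ valGo vs i 0) := by
  induction n with
  | zero =>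
    intro vs hlen i done hdone
    have hvs : vs = [] := List.eq_nil_of_length_eq_zero hlen
    subst hvs
    simp [PySem.List.pyRange_one_eq_nil (le_refl i), enumFrom, valGo]
  | succ n ih =>
    intro vs hlen i done hdone
    cases vs with
    | nil => simp at hlen
    | cons v rest =>
      have hlr : rest.length = n := by simpa using hlen
      have hdne : ∀ p ∈ done, p.1 ≠ i := fun p hp => by have := hdone p hp; omega
      have hener : ∀ p ∈ enumFrom (i + 1) rest, p.1 ≠ i := fun p hp => by
        have := enumFrom_keys_ge rest (i + 1) p hp; omega
      have hb : i + (((v :: rest).length : Int)) = i + 1 + (rest.length : Int) := by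
        simp only [List.length_cons]; push_cast; omega
      have hrange : PySem.List.pyRange i (i + ((v :: rest).length : Int)) 1
          = i :: PySem.List.pyRange (i + 1) (i + 1 + (rest.length : Int)) 1 := by
        rw [hb, PySem.List.pyRange_one_cons (by omega)]
      rw [hrange]
      simp only [List.foldl_cons]
      have henum : enumFrom i (v :: rest) = (i, v) :: enumFrom (i + 1) rest := rfl
      have hget : (PySem.Dict.mk (done ++ enumFrom i (v :: rest))).getD i 0 = v := by
        rw [henum]; exact getD_mid done _ i v hdne
      by_cases hv : v > 25
      · -- carry case
        have hins1 : (PySem.Dict.mk (done ++ enumFrom i (v :: rest))).insert i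
              (PySem.Int.mod v 26)
            = PySem.Dict.mk (done ++ (i, PySem.Int.mod v 26) :: enumFrom (i + 1) rest) := by
          rw [henum]; exact insert_mid done _ i v _ hdne hener
        cases rest with
        | nil =>
          have hcon : (PySem.Dict.mk (done ++ (i, PySem.Int.mod v 26)
                :: enumFrom (i + 1) [])).contains (i + 1) = false := by
            apply contains_none
            intro p hp
            simp only [enumFrom, List.mem_append, List.mem_cons, List.not_mem_nil,
              or_false] at hp
            rcases hp with hp | hp
            · have := hdone p hp; omega
            · subst hp; omega
          have hins0 : (PySem.Dict.mk (done ++ (i, PySem.Int.mod v 26)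
                :: enumFrom (i + 1) [])).insert (i + 1) 0
              = PySem.Dict.mk ((done ++ [(i, PySem.Int.mod v 26)]) ++ (i + 1, 0) :: []) := by
            rw [insert_absent _ _ _ hcon]
            simp [enumFrom]
          have hpre1 : ∀ p ∈ done ++ [(i, PySem.Int.mod v 26)], p.1 ≠ i + 1 := by
            intro p hp
            simp only [List.mem_append, List.mem_cons, List.not_mem_nil, or_false] at hp
            rcases hp with hp | hp
            · have := hdone p hp; omega
            · subst hp; omega
          have hget1 : (PySem.Dict.mk ((done ++ [(i, PySem.Int.mod v 26)])
                ++ (i + 1, 0) :: [])).getD (i + 1) 0 = 0 :=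
            getD_mid _ _ _ _ hpre1
          have hins2 : (PySem.Dict.mk ((done ++ [(i, PySem.Int.mod v 26)])
                ++ (i + 1, 0) :: [])).insert (i + 1) (0 + 1)
              = PySem.Dict.mk ((done ++ [(i, PySem.Int.mod v 26)]) ++ (i + 1, 1) :: []) := by
            have := insert_mid (done ++ [(i, PySem.Int.mod v 26)]) [] (i + 1) 0 (0 + 1)
              hpre1 (by simp)
            simpa using this
          simp only [aStep2, hget, hv, if_pos, hins1, hcon, Bool.false_eq_true,
            if_false, hins0, hget1, hins2]
          have hrg : PySem.List.pyRange (i + 1) (i + 1 + (([] : List Int).length : Int)) 1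
              = [] := by
            apply PySem.List.pyRange_one_eq_nil; simp
          rw [hrg]
          simp [valGo, hv]
        | cons r0 t =>
          have henum2 : enumFrom (i + 1) (r0 :: t)
              = (i + 1, r0) :: enumFrom (i + 1 + 1) t := rfl
          have hpre1 : ∀ p ∈ done ++ [(i, PySem.Int.mod v 26)], p.1 ≠ i + 1 := by
            intro p hp
            simp only [List.mem_append, List.mem_cons, List.not_mem_nil, or_false] at hp
            rcases hp with hp | hp
            · have := hdone p hp; omega
            · subst hp; omega
          have hrearr : done ++ (i, PySem.Int.mod v 26) :: enumFrom (i + 1) (r0 :: t)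
              = (done ++ [(i, PySem.Int.mod v 26)]) ++ (i + 1, r0) :: enumFrom (i + 1 + 1) t := by
            rw [henum2]; simp
          have hcon : (PySem.Dict.mk (done ++ (i, PySem.Int.mod v 26)
                :: enumFrom (i + 1) (r0 :: t))).contains (i + 1) = true := by
            rw [hrearr]; exact contains_mid _ _ _ _
          have hget1 : (PySem.Dict.mk (done ++ (i, PySem.Int.mod v 26)
                :: enumFrom (i + 1) (r0 :: t))).getD (i + 1) 0 = r0 := by
            rw [hrearr]; exact getD_mid _ _ _ _ hpre1
          have henet : ∀ p ∈ enumFrom (i + 1 + 1) t, p.1 ≠ i + 1 := fun p hp => by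
            have := enumFrom_keys_ge t (i + 1 + 1) p hp; omega
          have hins2 : (PySem.Dict.mk (done ++ (i, PySem.Int.mod v 26)
                :: enumFrom (i + 1) (r0 :: t))).insert (i + 1) (r0 + 1)
              = PySem.Dict.mk ((done ++ [(i, PySem.Int.mod v 26)])
                  ++ (i + 1, r0 + 1) :: enumFrom (i + 1 + 1) t) := by
            rw [hrearr]; exact insert_mid _ _ _ _ _ hpre1 henet
          have hstep : aStep2 (PySem.Dict.mk (done ++ enumFrom i (v :: r0 :: t))) i
              = PySem.Dict.mk ((done ++ [(i, PySem.Int.mod v 26)])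
                  ++ enumFrom (i + 1) ((r0 + 1) :: t)) := by
            simp only [aStep2, hget, hv, if_pos, hins1, hcon, hget1, hins2]
            rfl
          rw [hstep]
          have hdone' : ∀ p ∈ done ++ [(i, PySem.Int.mod v 26)], p.1 < i + 1 := by
            intro p hp
            simp only [List.mem_append, List.mem_cons, List.not_mem_nil, or_false] at hp
            rcases hp with hp | hp
            · have := hdone p hp; omega
            · subst hp; omega
          have hlen' : ((r0 + 1) :: t).length = n := by simpa using hlr
          have hrg : PySem.List.pyRange (i + 1) (i + 1 + ((r0 :: t).length : Int)) 1
              = PySem.List.pyRange (i + 1) (i + 1 + (((r0 + 1) :: t).length : Int)) 1 := by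
            simp
          rw [hrg, ih ((r0 + 1) :: t) hlen' (i + 1) _ hdone']
          rw [← valGo_carry]
          show PySem.Dict.mk ((done ++ [(i, PySem.Int.mod v 26)]) ++ valGo (r0 :: t) (i + 1) 1)
            = PySem.Dict.mk (done ++ valGo (v :: r0 :: t) i 0)
          have : valGo (v :: r0 :: t) i 0
              = (i, PySem.Int.mod v 26) :: valGo (r0 :: t) (i + 1) 1 := by
            simp [valGo, hv]
          rw [this]; simp
      · -- no carry
        have hstep : aStep2 (PySem.Dict.mk (done ++ enumFrom i (v :: rest))) i
            = PySem.Dict.mk ((done ++ [(i, v)]) ++ enumFrom (i + 1) rest) := by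
          simp only [aStep2, hget, hv, if_false]
          rw [henum]; simp
        rw [hstep]
        have hdone' : ∀ p ∈ done ++ [(i, v)], p.1 < i + 1 := by
          intro p hp
          simp only [List.mem_append, List.mem_cons, List.not_mem_nil, or_false] at hp
          rcases hp with hp | hp
          · have := hdone p hp; omega
          · subst hp; omega
        rw [ih rest hlr (i + 1) _ hdone']
        have : valGo (v :: rest) i 0 = (i, v) :: valGo rest (i + 1) 0 := by
          simp [valGo, hv]
        rw [this]; simp


-- ===== VERDICT (by name: the statement is the Claim_ definition above) =====
theorem alph_to_base_26_spec : Claim_equal_alph_to_base_26 := by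
  intro str _
  show alph_to_base_26 str = alph_to_base_26_alt str
  unfold alph_to_base_26 alph_to_base_26_alt
  show (List.foldl aStep2
      (List.foldl (aStep1 str.toList) (PySem.Dict.empty, 0)
        (PySem.List.pyRange ((str.toList.length : Int) - 1) (-1) (-1))).1
      (PySem.List.pyRange 0
        (List.foldl (aStep1 str.toList) (PySem.Dict.empty, 0)
          (PySem.List.pyRange ((str.toList.length : Int) - 1) (-1) (-1))).2 1)).items
    = altGo str.toList.reverse 0 0
  have e2 : (PySem.List.pyRange ((str.toList.length : Int) - 1) (-1) (-1)).map
        (fun i => ordVal (PySem.List.pyGetD str.toList i ' '))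
      = str.toList.reverse.map ordVal := by
    rw [PySem.List.pyRange_neg_one_eq_reverse,
      show ((-1 : Int) + 1) = 0 by norm_num,
      show ((str.toList.length : Int) - 1) + 1 = (str.toList.length : Int) by ring,
      List.map_reverse, List.map_reverse]
    congr 1
    rw [show (fun i => ordVal (PySem.List.pyGetD str.toList i ' '))
        = (ordVal ∘ fun i => PySem.List.pyGetD str.toList i ' ') from rfl,
      ← List.map_map, PySem.List.map_pyGetD_pyRange_zero']
  have e1 : (PySem.List.pyRange ((str.toList.length : Int) - 1) (-1) (-1)).foldl
        (aStep1 str.toList) (PySem.Dict.empty, 0)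
      = (PySem.Dict.mk (enumFrom 0 (str.toList.reverse.map ordVal)),
          0 + ((str.toList.reverse.map ordVal).length : Int)) := by
    have e0 : (PySem.List.pyRange ((str.toList.length : Int) - 1) (-1) (-1)).foldl
          (aStep1 str.toList) (PySem.Dict.empty, 0)
        = ((PySem.List.pyRange ((str.toList.length : Int) - 1) (-1) (-1)).map
            (fun i => ordVal (PySem.List.pyGetD str.toList i ' '))).foldl step1
            (PySem.Dict.empty, 0) := by
      rw [List.foldl_map]
      rfl
    rw [e0, e2, pass1 _ _ _ (fun k _ => rfl)]
    rfl
  rw [e1]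
  have h3 := pass2 (str.toList.reverse.map ordVal).length (str.toList.reverse.map ordVal)
    rfl 0 [] (by simp)
  simp only [List.nil_append, zero_add] at h3 ⊢
  rw [h3, altGo_eq_valGo]
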